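-- pv_equiv track=rewrite | github.com/francistianlal/codability_challenge | Dreamteam.py | solution
-- ===== SOURCE A (Python) =====
-- def solution(A,B,F):
--     dif = [] # the difference between A and B
--     for index in range(len(A)):
--         dif.append(A[index]-B[index])
--     ref = sorted(range(len(dif)),key = dif.__getitem__)
--     count = 0
--     while  F != 0:
--         count += A[ref.pop()]
--         F -= 1
--     while len(ref) != 0:
--         count += B[ref.pop()]
--
--     return count
-- ===== SOURCE B (Python) =====
-- def solution(A, B, F):
--     # sum of B over A's index range, plus the F largest (A[i]-B[i]) differences
--     diffs = sorted((A[i] - B[i] for i in range(len(A))), reverse=True)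
--     return sum(B[:len(A)]) + sum(diffs[:F])
-- ===== Notes on version B (the rewrite author's own statement) =====
-- stated objective: simpler
-- what changed: B drops A's index argsort (sorted(range(n), key=...)) and the two destructive pop loops entirely: it sorts the difference list itself in descending order and returns sum(B[:len(A)]) plus the sum of the first F differences, using that equal diffs make the choice of tied indices irrelevant.
import Mathlib
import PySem

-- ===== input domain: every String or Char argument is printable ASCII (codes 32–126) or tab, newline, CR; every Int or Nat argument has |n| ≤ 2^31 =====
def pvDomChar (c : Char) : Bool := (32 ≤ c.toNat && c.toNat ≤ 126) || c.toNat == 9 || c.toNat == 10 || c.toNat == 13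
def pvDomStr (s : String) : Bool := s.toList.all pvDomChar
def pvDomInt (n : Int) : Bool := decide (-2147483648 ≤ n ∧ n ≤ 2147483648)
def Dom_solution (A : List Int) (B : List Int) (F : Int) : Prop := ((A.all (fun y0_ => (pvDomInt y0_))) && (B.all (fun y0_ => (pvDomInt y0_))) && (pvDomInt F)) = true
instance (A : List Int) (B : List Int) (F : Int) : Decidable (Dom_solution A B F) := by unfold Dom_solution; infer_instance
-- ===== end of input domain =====

-- B replaces A's argsort + two pop loops with sum(B[:len(A)]) plus the sum of the F
-- largest differences read off a reverse-sorted difference list (objective: simpler).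

-- ===== PORT A =====
-- while F != 0: count += A[ref.pop()]; F -= 1   (pop from the end; empty pop = IndexError, excluded by Pre_)
def solutionLoop1 (A : List Int) (F : Int) (ref : List Int) (count : Int) : List Int × Int :=
  if F = 0 then (ref, count)
  else
    match h : PySem.List.pop? ref (-1) with
    | none => (ref, count)   -- Python raises IndexError here; Pre_ excludes these inputs
    | some (i, ref') =>
        solutionLoop1 A (F - 1) ref' (count + PySem.List.pyGetD A i 0)
termination_by ref.length
decreasing_by
  have := PySem.List.length_of_pop?_eq_some ref h; simp at this
  omega

-- while len(ref) != 0: count += B[ref.pop()]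
def solutionLoop2 (B : List Int) (ref : List Int) (count : Int) : Int :=
  match h : PySem.List.pop? ref (-1) with
  | none => count
  | some (i, ref') => solutionLoop2 B ref' (count + PySem.List.pyGetD B i 0)
termination_by ref.length
decreasing_by
  have := PySem.List.length_of_pop?_eq_some ref h; simp at this
  omega

def solution (A : List Int) (B : List Int) (F : Int) : Int :=
  let dif := (PySem.List.pyRange 0 (A.length : Int) 1).map
      (fun index => PySem.List.pyGetD A index 0 - PySem.List.pyGetD B index 0)
  let ref := PySem.List.sorted (PySem.List.pyRange 0 (dif.length : Int) 1)
      (fun i => PySem.List.pyGetD dif i 0) false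
  let r := solutionLoop1 A F ref 0
  solutionLoop2 B r.1 r.2

-- ===== PORT B =====
def solution_alt (A : List Int) (B : List Int) (F : Int) : Int :=
  let diffs := PySem.List.sorted
      ((PySem.List.pyRange 0 (A.length : Int) 1).map
        (fun i => PySem.List.pyGetD A i 0 - PySem.List.pyGetD B i 0))
      (fun x => x) true
  (PySem.List.slice B none (some (A.length : Int))).sum
    + (PySem.List.slice diffs none (some F)).sum

-- ===== PRECONDITION & SPEC =====
-- Pre_ excludes exactly the inputs where A raises: F outside 0..len(A) pops an empty
-- list (IndexError), and len(B) < len(A) indexes past B (IndexError).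
def Pre_solution (A : List Int) (B : List Int) (F : Int) : Prop :=
  0 ≤ F ∧ F ≤ (A.length : Int) ∧ A.length ≤ B.length
instance (A : List Int) (B : List Int) (F : Int) : Decidable (Pre_solution A B F) := by
  unfold Pre_solution; infer_instance
def pvWitness_solution : List Int × List Int × Int := ([4, 1, 7], [2, 2, 2], 2)

def Spec_solution (A : List Int) (B : List Int) (F : Int) (out : Int) : Prop := out = solution_alt A B F
instance (A : List Int) (B : List Int) (F : Int) (out : Int) : Decidable (Spec_solution A B F out) := by unfold Spec_solution; infer_instance

-- ===== CLAIM (what is proved, stated in full; the proofs are below) =====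
def Claim_equal_solution : Prop := ∀ (A : List Int) (B : List Int) (F : Int), Dom_solution A B F → Pre_solution A B F → Spec_solution A B F (solution A B F)

-- ===== LEMMAS AND PROOFS =====

-- loop1 pops exactly the last ys (|ys| = F) and adds A at those indices
theorem loop1_spec (A : List Int) (ys : List Int) :
    ∀ (xs : List Int) (count : Int),
      solutionLoop1 A (ys.length : Int) (xs ++ ys) count
        = (xs, count + (ys.map (fun i => PySem.List.pyGetD A i 0)).sum) := by
  induction ys using List.reverseRecOn with
  | nil => intro xs count; simp [solutionLoop1]
  | append_singleton ys y ih =>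
      intro xs count
      rw [solutionLoop1]
      have hne : ((ys ++ [y]).length : Int) ≠ 0 := by simp; omega
      rw [if_neg hne]
      split
      next h =>
        rw [← List.append_assoc, PySem.List.pop?_last] at h
        exact absurd h (by simp)
      next i ref' h =>
        rw [← List.append_assoc, PySem.List.pop?_last] at h
        obtain ⟨rfl, rfl⟩ : y = i ∧ xs ++ ys = ref' := by simpa using h
        have hlen : ((ys ++ [y]).length : Int) - 1 = (ys.length : Int) := by simp
        rw [hlen, ih xs (count + PySem.List.pyGetD A y 0)]
        simp; ring

-- loop2 pops everything, adding B at every remaining index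
theorem loop2_spec (B : List Int) (ref : List Int) :
    ∀ (count : Int),
      solutionLoop2 B ref count = count + (ref.map (fun i => PySem.List.pyGetD B i 0)).sum := by
  induction ref using List.reverseRecOn with
  | nil =>
      intro count
      rw [solutionLoop2]
      split
      next => simp
      next i ref' h => simp [PySem.List.pop?] at h
  | append_singleton ref y ih =>
      intro count
      rw [solutionLoop2]
      split
      next h => rw [PySem.List.pop?_last] at h; exact absurd h (by simp)
      next i ref' h =>
        rw [PySem.List.pop?_last] at h
        obtain ⟨rfl, rfl⟩ : y = i ∧ ref = ref' := by simpa using h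
        rw [ih (count + PySem.List.pyGetD B y 0)]
        simp; ring

-- summing B over range(len(A)) is summing B[:len(A)]
theorem range_getD_eq_take (A B : List Int) (hn : A.length ≤ B.length) :
    (PySem.List.pyRange 0 (A.length : Int) 1).map (fun j => PySem.List.pyGetD B j 0)
      = B.take A.length := by
  apply List.ext_getElem
  · simp [PySem.List.length_pyRange_one]; omega
  · intro i h1 h2
    have hi : i < A.length := by
      simpa [PySem.List.length_pyRange_one] using h1
    have hr : i < (PySem.List.pyRange 0 (A.length : Int) 1).length := by
      simpa [PySem.List.length_pyRange_one] using hi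
    simp only [List.getElem_map, PySem.List.getElem_pyRange_one _ _ _ hr, List.getElem_take]
    rw [PySem.List.pyGetD_eq_getElem B 0 (by omega) (by omega)]
    simp

-- ===== VERDICT (by name: the statement is the Claim_ definition above) =====
theorem solution_spec : Claim_equal_solution := by
  intro A B F _ hpre
  obtain ⟨hF0, hFn, hn⟩ := hpre
  unfold Spec_solution solution solution_alt
  dsimp only
  set n := A.length with hnA
  set dif := (PySem.List.pyRange 0 (n : Int) 1).map
      (fun index => PySem.List.pyGetD A index 0 - PySem.List.pyGetD B index 0) with hdif
  have hdiflen : dif.length = n := by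
    simp [hdif, PySem.List.length_pyRange_one]
  set key : Int → Int := fun i => PySem.List.pyGetD dif i 0 with hkey
  set ref := PySem.List.sorted (PySem.List.pyRange 0 (dif.length : Int) 1) key false with href
  have hreflen : ref.length = n := by
    simp [href, PySem.List.length_sorted, PySem.List.length_pyRange_one, hdiflen]
  set k := F.toNat with hk
  have hkn : k ≤ n := by omega
  have hFk : F = (k : Int) := by omega
  -- split ref into the kept prefix and the popped suffix
  have hsplit : ref = ref.take (n - k) ++ ref.drop (n - k) := by
    simp
  have hdroplen : (ref.drop (n - k)).length = k := by
    simp [hreflen]; omega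
  -- evaluate the two loops
  have hloop1 := loop1_spec A (ref.drop (n - k)) (ref.take (n - k)) 0
  rw [List.take_append_drop, hdroplen, ← hFk] at hloop1
  rw [hloop1]
  rw [loop2_spec]
  -- every index in ref lies in [0, n)
  have hmem : ∀ i ∈ ref, 0 ≤ i ∧ i < (n : Int) := by
    intro i hi
    rw [href, PySem.List.mem_sorted] at hi
    rw [hdiflen] at hi
    exact PySem.List.mem_pyRange_one.mp hi
  -- A at an index = B there + the difference there
  have hAB : ∀ i ∈ ref, PySem.List.pyGetD A i 0 = PySem.List.pyGetD B i 0 + key i := by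
    intro i hi
    obtain ⟨h0, h1⟩ := hmem i hi
    rw [hkey]
    simp only [hdif]
    rw [PySem.List.pyGetD_map_pyRange_of_nonneg _ _ _ _ h0 h1]
    ring
  -- the mapped keys of ref are the ascending sort of dif
  set sortedAsc := PySem.List.sorted dif (fun x => x) false with hsa
  have hrefmap : ref.map key = sortedAsc := by
    apply PySem.List.eq_of_perm_of_pairwise_le_of_injective (fun x : Int => x)
        (fun a b h => h)
    · have h1 : (ref.map key).Perm dif := by
        have := (PySem.List.sorted_perm (PySem.List.pyRange 0 (dif.length : Int) 1) key false).map key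
        rw [← href] at this
        calc (ref.map key).Perm ((PySem.List.pyRange 0 (dif.length : Int) 1).map key) := this
          _ = dif := by
              rw [hkey]
              simpa using PySem.List.map_pyGetD_pyRange_zero dif 0
      exact h1.trans (PySem.List.sorted_perm dif (fun x => x) false).symm
    · exact PySem.List.sorted_map_key_pairwise _ key
    · exact PySem.List.sorted_pairwise dif (fun x => x)
  -- the reverse-sorted diffs are the reverse of the ascending sort
  have hrev : PySem.List.sorted dif (fun x => x) true = sortedAsc.reverse := by
    have : (PySem.List.sorted dif (fun x : Int => x) true).reverse = sortedAsc := by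
      apply PySem.List.eq_of_perm_of_pairwise_le_of_injective (fun x : Int => x)
          (fun a b h => h)
      · exact ((List.reverse_perm _).trans (PySem.List.sorted_perm dif _ true)).trans
          (PySem.List.sorted_perm dif (fun x => x) false).symm
      · exact List.pairwise_reverse.mpr (PySem.List.sorted_pairwise_rev dif (fun x => x))
      · exact PySem.List.sorted_pairwise dif (fun x => x)
    rw [← this, List.reverse_reverse]
  rw [hrev]
  -- rewrite both slices
  rw [PySem.List.slice_to B (by positivity), PySem.List.slice_to _ hF0]
  -- sum over the popped suffix: B-part + dif-part
  have hsum1 : ((ref.drop (n - k)).map (fun i => PySem.List.pyGetD A i 0)).sum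
      = ((ref.drop (n - k)).map (fun i => PySem.List.pyGetD B i 0)).sum
        + ((ref.drop (n - k)).map key).sum := by
    rw [← List.sum_map_add]
    apply congrArg
    apply List.map_congr_left
    intro i hi
    exact hAB i (List.mem_of_mem_drop hi)
  -- sum of B over all of ref = sum of B[:n]
  have hsum2 : ((ref.take (n - k)).map (fun i => PySem.List.pyGetD B i 0)).sum
        + ((ref.drop (n - k)).map (fun i => PySem.List.pyGetD B i 0)).sum
      = (B.take n).sum := by
    rw [← List.sum_append, ← List.map_append, List.take_append_drop]
    have hperm : (ref.map (fun i => PySem.List.pyGetD B i 0)).Perm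
        ((PySem.List.pyRange 0 (dif.length : Int) 1).map (fun i => PySem.List.pyGetD B i 0)) :=
      (PySem.List.sorted_perm _ key false).map _
    rw [hperm.sum_eq, hdiflen, range_getD_eq_take A B hn]
  -- sum of dif over the popped suffix = sum of the top-k of the sorted diffs
  have hsum3 : ((ref.drop (n - k)).map key).sum = ((sortedAsc.reverse).take k).sum := by
    rw [List.map_drop, hrefmap]
    rw [← List.sum_reverse (List.take k sortedAsc.reverse), List.reverse_take,
        List.reverse_reverse]
    have hlen : sortedAsc.length = n := by
      rw [hsa, PySem.List.length_sorted, hdiflen]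
    rw [List.length_reverse, hlen]
  rw [hsum1, hsum3]
  dsimp only
  rw [Int.toNat_natCast, ← hk]
  linarith [hsum2]
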